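-- pv_equiv track=rewrite | github.com/miello/com_prog | 09_MoreDC/09_MoreDC_33.py | mult_poly
-- ===== SOURCE A (Python) =====
-- def mult_poly(p1, p2):
--     memo = dict()
--
--     for co_1, expo_1 in p1:
--         for co_2, expo_2 in p2:
--             if not memo.get(expo_1 + expo_2):
--                 memo[expo_1 + expo_2] = 0
--             memo[expo_1 + expo_2] += co_1 * co_2
--
--     temp_list = []
--     for expo, co in sorted(list(memo.items()), key=lambda x: -x[0]):
--         if co != 0:
--             temp_list.append((co, expo))
--
--     return temp_list
-- ===== SOURCE B (Python) =====
-- def mult_poly(p1, p2):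
--     terms = sorted(
--         ((e1 + e2, c1 * c2) for c1, e1 in p1 for c2, e2 in p2),
--         key=lambda t: -t[0],
--     )
--     merged = []
--     for e, c in terms:
--         if merged and merged[-1][0] == e:
--             merged[-1] = (e, merged[-1][1] + c)
--         else:
--             merged.append((e, c))
--     return [(c, e) for e, c in merged if c != 0]
-- ===== Notes on version B (the rewrite author's own statement) =====
-- stated objective: alternative
-- what changed: Replaces the dict-based aggregation with a sort-and-merge grouping: all pairwise products are expanded into a flat (exponent, coeff) list, sorted by descending exponent, and merged in one linear pass that sums adjacent equal exponents and finally drops zero coefficients.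
import Mathlib
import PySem

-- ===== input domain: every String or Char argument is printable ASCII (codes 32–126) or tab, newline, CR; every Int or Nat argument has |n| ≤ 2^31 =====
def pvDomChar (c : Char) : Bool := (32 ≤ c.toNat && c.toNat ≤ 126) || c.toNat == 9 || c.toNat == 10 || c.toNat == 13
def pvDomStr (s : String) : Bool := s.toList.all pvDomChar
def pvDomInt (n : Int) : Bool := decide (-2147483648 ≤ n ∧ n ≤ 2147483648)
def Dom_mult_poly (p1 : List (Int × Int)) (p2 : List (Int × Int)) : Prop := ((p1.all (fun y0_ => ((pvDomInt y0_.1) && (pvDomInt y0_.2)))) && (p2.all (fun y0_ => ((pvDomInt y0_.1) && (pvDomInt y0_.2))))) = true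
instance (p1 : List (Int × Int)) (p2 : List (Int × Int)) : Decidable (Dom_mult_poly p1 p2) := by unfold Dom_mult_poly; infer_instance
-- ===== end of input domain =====

-- B replaces A's dict-based aggregation by expand-all-products, sort by descending exponent,
-- then a single linear merge pass (objective: alternative algorithm of similar cost).

-- ===== PORT A =====
-- 'if not memo.get(k)' is true exactly when the key is absent or its value is 0,
-- i.e. when memo.getD k 0 = 0; 'memo[k] += v' (key present after the guard) is insert k (getD k 0 + v).
def mult_poly (p1 : List (Int × Int)) (p2 : List (Int × Int)) : List (Int × Int) :=
  let memo : PySem.Dict Int Int :=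
    p1.foldl (fun memo t1 =>
      p2.foldl (fun memo t2 =>
        let key := t1.2 + t2.2
        let memo' := if memo.getD key 0 = 0 then memo.insert key 0 else memo
        memo'.insert key (memo'.getD key 0 + t1.1 * t2.1)) memo) PySem.Dict.empty
  (PySem.List.sorted memo.items (fun x => -x.1)).foldl
    (fun acc it => if it.2 ≠ 0 then acc ++ [(it.2, it.1)] else acc) []

-- ===== PORT B =====
-- the flat list of all pairwise products, one (exponent, coeff) entry per term pair
def pvTerms (p1 : List (Int × Int)) (p2 : List (Int × Int)) : List (Int × Int) :=
  p1.flatMap (fun t1 => p2.map (fun t2 => (t1.2 + t2.2, t1.1 * t2.1)))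

-- one step of B's merge loop: sum into the last entry when the exponent repeats, else append
def pvMergeStep (acc : List (Int × Int)) (t : Int × Int) : List (Int × Int) :=
  match acc.getLast? with
  | some l => if l.1 = t.1 then acc.dropLast ++ [(t.1, l.2 + t.2)] else acc ++ [t]
  | none => acc ++ [t]

def mult_poly_alt (p1 : List (Int × Int)) (p2 : List (Int × Int)) : List (Int × Int) :=
  let terms := PySem.List.sorted (pvTerms p1 p2) (fun t => -t.1)
  let merged := terms.foldl pvMergeStep []
  (merged.filter (fun t => decide (t.2 ≠ 0))).map (fun t => (t.2, t.1))

-- ===== PRECONDITION & SPEC =====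
def Spec_mult_poly (p1 : List (Int × Int)) (p2 : List (Int × Int)) (out : List (Int × Int)) : Prop := out = mult_poly_alt p1 p2
instance (p1 : List (Int × Int)) (p2 : List (Int × Int)) (out : List (Int × Int)) : Decidable (Spec_mult_poly p1 p2 out) := by unfold Spec_mult_poly; infer_instance

-- ===== CLAIM (what is proved, stated in full; the proofs are below) =====
def Claim_equal_mult_poly : Prop := ∀ (p1 : List (Int × Int)) (p2 : List (Int × Int)), Dom_mult_poly p1 p2 → Spec_mult_poly p1 p2 (mult_poly p1 p2)

-- ===== LEMMAS AND PROOFS =====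

-- A's combined per-pair dict update, as a named step function
def pvStepA (m : PySem.Dict Int Int) (t : Int × Int) : PySem.Dict Int Int :=
  let m' := if m.getD t.1 0 = 0 then m.insert t.1 0 else m
  m'.insert t.1 (m'.getD t.1 0 + t.2)

-- total coefficient contributed to exponent k by a term list
def pvKeySum (L : List (Int × Int)) (k : Int) : Int :=
  ((L.filter (fun t => t.1 == k)).map (·.2)).sum

theorem pv_foldA_eq (p1 p2 : List (Int × Int)) (d : PySem.Dict Int Int) :
    p1.foldl (fun memo t1 =>
      p2.foldl (fun memo t2 =>
        let key := t1.2 + t2.2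
        let memo' := if memo.getD key 0 = 0 then memo.insert key 0 else memo
        memo'.insert key (memo'.getD key 0 + t1.1 * t2.1)) memo) d
    = (pvTerms p1 p2).foldl pvStepA d := by
  simp only [pvTerms, List.foldl_flatMap, List.foldl_map, pvStepA]

theorem pv_getD_stepA (m : PySem.Dict Int Int) (t : Int × Int) (e : Int) :
    (pvStepA m t).getD e 0 = if e = t.1 then m.getD t.1 0 + t.2 else m.getD e 0 := by
  unfold pvStepA
  by_cases h0 : m.getD t.1 0 = 0 <;>
    simp [h0, PySem.Dict.getD_insert] <;> split_ifs <;> simp_all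

theorem pv_getD_foldA (L : List (Int × Int)) (d : PySem.Dict Int Int) (e : Int) :
    (L.foldl pvStepA d).getD e 0 = d.getD e 0 + pvKeySum L e := by
  induction L generalizing d with
  | nil => simp [pvKeySum]
  | cons t L ih =>
    simp only [List.foldl_cons, ih, pv_getD_stepA, pvKeySum, List.filter_cons]
    by_cases h : e = t.1 <;> simp [h] <;> [skip; simp [Ne.symm h]]
    · simp [pvKeySum, add_assoc]

theorem pv_keys_stepA (m : PySem.Dict Int Int) (t : Int × Int) :
    (pvStepA m t).keys = PySem.Set.add m.keys t.1 := by
  unfold pvStepA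
  by_cases hc : m.contains t.1
  · have hmem : t.1 ∈ m.keys := (PySem.Dict.contains_iff_mem_keys m t.1).mp hc
    have hadd : PySem.Set.add m.keys t.1 = m.keys := by
      simp [PySem.Set.add, hmem]
    by_cases h0 : m.getD t.1 0 = 0 <;>
      simp [h0, hadd, PySem.Dict.keys_insert_of_contains, hc,
        PySem.Dict.contains_insert_self]
  · have h0 : m.getD t.1 0 = 0 := PySem.Dict.getD_of_not_contains m 0 (by simpa using hc)
    have hmem : t.1 ∉ m.keys := fun h => hc ((PySem.Dict.contains_iff_mem_keys m t.1).mpr h)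
    have hadd : PySem.Set.add m.keys t.1 = m.keys ++ [t.1] := by
      simp [PySem.Set.add, hmem]
    simp [h0, hadd, PySem.Dict.keys_insert_of_not_contains, hc,
      PySem.Dict.keys_insert_of_contains, PySem.Dict.contains_insert_self]

theorem pv_keys_foldA (L : List (Int × Int)) (d : PySem.Dict Int Int) :
    (L.foldl pvStepA d).keys = (L.map (·.1)).foldl PySem.Set.add d.keys := by
  induction L generalizing d with
  | nil => rfl
  | cons t L ih => simp [ih, pv_keys_stepA]

theorem pv_foldl_add_filter {a : Int} (xs : List Int) (s : PySem.Set Int) (ha : a ∈ s) :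
    xs.foldl PySem.Set.add s = (xs.filter (fun x => x != a)).foldl PySem.Set.add s := by
  induction xs generalizing s with
  | nil => rfl
  | cons x xs ih =>
    by_cases hx : x = a
    · subst hx
      have : PySem.Set.add s x = s := by simp [PySem.Set.add, ha]
      simp [List.filter_cons, this, ih s ha]
    · have ha' : a ∈ PySem.Set.add s x := by simp [PySem.Set.mem_add, ha]
      simp [List.filter_cons, hx, ih _ ha']

theorem pv_foldl_add_cons {a : Int} (ys : List Int) (s : List Int) (ha : a ∉ ys) :
    ys.foldl PySem.Set.add (a :: s) = a :: ys.foldl PySem.Set.add s := by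
  induction ys generalizing s with
  | nil => rfl
  | cons y ys ih =>
    have hya : y ≠ a := by rintro rfl; exact ha (List.mem_cons_self)
    have hstep : PySem.Set.add (a :: s) y = a :: PySem.Set.add s y := by
      simp [PySem.Set.add, List.contains_cons, hya]
      split_ifs <;> simp_all
    rw [List.foldl_cons, hstep, List.foldl_cons, ih _ (fun h => ha (List.mem_cons_of_mem _ h))]

theorem pv_ofList_cons (a : Int) (xs : List Int) :
    PySem.Set.ofList (a :: xs) = a :: PySem.Set.ofList (xs.filter (fun x => x != a)) := by
  have h1 : PySem.Set.ofList (a :: xs) = xs.foldl PySem.Set.add [a] := rfl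
  have h2 : PySem.Set.ofList (xs.filter (fun x => x != a))
      = (xs.filter (fun x => x != a)).foldl PySem.Set.add [] := rfl
  rw [h1, h2, pv_foldl_add_filter (a := a) xs [a] (by simp),
    pv_foldl_add_cons (a := a) _ _ (by simp)]

theorem pv_foldl_add_sublist (xs s : List Int) :
    List.Sublist (xs.foldl PySem.Set.add s) (s ++ xs) := by
  induction xs generalizing s with
  | nil => simp
  | cons x xs ih =>
    rw [List.foldl_cons]
    by_cases hc : PySem.Set.add s x = s
    · rw [hc]
      exact (ih s).trans (by simp [List.append_sublist_append_left, List.sublist_cons_self])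
    · have : PySem.Set.add s x = s ++ [x] := by
        unfold PySem.Set.add at *; split_ifs at * <;> simp_all
      rw [this]
      simpa using ih (s ++ [x])

theorem pv_neg_lt_pairwise (l : List Int) (hnd : l.Nodup) (h : l.Pairwise (fun a b => -a ≤ -b)) :
    l.Pairwise (fun a b => -a < -b) := by
  have := List.Pairwise.and hnd h
  exact this.imp (fun ⟨hne, hle⟩ => by omega)

theorem pv_keySum_nil (k : Int) : pvKeySum [] k = 0 := rfl

theorem pv_keySum_zero (L : List (Int × Int)) (k : Int) (h : ∀ t ∈ L, t.1 ≠ k) :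
    pvKeySum L k = 0 := by
  unfold pvKeySum
  rw [List.filter_eq_nil_iff.mpr (by intro t ht; simpa using h t ht)]
  rfl

theorem pv_mergeStep_last (acc : List (Int × Int)) (l t : Int × Int)
    (h : acc.getLast? = some l) :
    pvMergeStep acc t =
      if l.1 = t.1 then acc.dropLast ++ [(t.1, l.2 + t.2)] else acc ++ [t] := by
  unfold pvMergeStep; rw [h]

theorem pv_merge_go (rest : List (Int × Int)) :
    ∀ (done : List (Int × Int)) (k s : Int),
    rest.Pairwise (fun a b => b.1 ≤ a.1) → (∀ t ∈ rest, t.1 ≤ k) → (∀ d ∈ done, k < d.1) →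
    rest.foldl pvMergeStep (done ++ [(k, s)])
      = done ++ [(k, s + pvKeySum rest k)]
        ++ (PySem.Set.ofList ((rest.filter (fun t => t.1 != k)).map (·.1))).map
             (fun j => (j, pvKeySum rest j)) := by
  induction rest with
  | nil => intro done k s _ _ _; simp [pv_keySum_nil, PySem.Set.ofList]
  | cons t r ih =>
    obtain ⟨tk, tc⟩ := t
    intro done k s hpw hle hdone
    have hlast : (done ++ [(k, s)]).getLast? = some (k, s) := by
      simp [List.getLast?_append]
    have hrle : ∀ u ∈ r, u.1 ≤ tk := by
      intro u hu; exact (List.pairwise_cons.mp hpw).1 u hu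
    have htkk : tk ≤ k := hle (tk, tc) List.mem_cons_self
    rw [List.foldl_cons, pv_mergeStep_last _ _ _ hlast]
    by_cases hkt : k = tk
    · -- same exponent: merge into the last entry
      rw [if_pos hkt, ← hkt]
      have hdrop : (done ++ [(k, s)]).dropLast = done := by simp
      rw [hdrop, ih done k (s + tc) (List.pairwise_cons.mp hpw).2
        (fun u hu => le_trans (hrle u hu) htkk) hdone]
      have h1 : pvKeySum ((k, tc) :: r) k = tc + pvKeySum r k := by
        simp [pvKeySum, List.filter_cons]
      have h2 : ((k, tc) :: r).filter (fun u => u.1 != k) = r.filter (fun u => u.1 != k) := by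
        simp [List.filter_cons]
      have hmap : (PySem.Set.ofList ((r.filter (fun u => u.1 != k)).map (·.1))).map
            (fun j => (j, pvKeySum ((k, tc) :: r) j))
          = (PySem.Set.ofList ((r.filter (fun u => u.1 != k)).map (·.1))).map
            (fun j => (j, pvKeySum r j)) := by
        apply List.map_congr_left
        intro j hj
        have hj' : j ∈ (r.filter (fun u => u.1 != k)).map (·.1) :=
          (PySem.Set.mem_ofList _ j).mp hj
        obtain ⟨u, hu, rfl⟩ := List.mem_map.mp hj'
        have hne : u.1 ≠ k := by simpa using (List.mem_filter.mp hu).2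
        simp [pvKeySum, List.filter_cons, Ne.symm hne]
      rw [h1, h2, hmap, add_assoc]
    · -- smaller exponent: a new run starts
      have htk : tk < k := lt_of_le_of_ne htkk (fun h => hkt h.symm)
      rw [if_neg hkt]
      have happ : done ++ [(k, s)] ++ [((tk, tc) : Int × Int)]
          = (done ++ [(k, s)]) ++ [(tk, tc)] := by simp
      rw [happ, ih (done ++ [(k, s)]) tk tc (List.pairwise_cons.mp hpw).2 hrle
        (by intro d hd
            rcases List.mem_append.mp hd with h | h
            · exact lt_trans htk (hdone d h)
            · simp at h; rw [h]; exact htk)]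
      have hrk : ∀ u ∈ ((tk, tc) :: r), u.1 ≠ k := by
        intro u hu
        rcases List.mem_cons.mp hu with rfl | hu'
        · exact fun h => hkt h.symm
        · exact fun h => absurd (h ▸ hrle u hu') (not_le.mpr htk)
      have h1 : pvKeySum ((tk, tc) :: r) k = 0 := pv_keySum_zero _ _ hrk
      have h2 : ((tk, tc) :: r).filter (fun u => u.1 != k) = (tk, tc) :: r := by
        apply List.filter_eq_self.mpr
        intro u hu; simpa using hrk u hu
      have h3 : pvKeySum ((tk, tc) :: r) tk = tc + pvKeySum r tk := by
        simp [pvKeySum, List.filter_cons]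
      have h4 : (((tk, tc) :: r).map (·.1)) = tk :: r.map (·.1) := rfl
      rw [h1, h2, h4, pv_ofList_cons]
      have h5 : (r.map (·.1)).filter (fun x => x != tk)
          = (r.filter (fun u => u.1 != tk)).map (·.1) := by
        rw [List.filter_map]; rfl
      rw [h5]
      simp only [List.map_cons, h3]
      have hmap : (PySem.Set.ofList ((r.filter (fun u => u.1 != tk)).map (·.1))).map
            (fun j => (j, pvKeySum ((tk, tc) :: r) j))
          = (PySem.Set.ofList ((r.filter (fun u => u.1 != tk)).map (·.1))).map
            (fun j => (j, pvKeySum r j)) := by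
        apply List.map_congr_left
        intro j hj
        have hj' : j ∈ (r.filter (fun u => u.1 != tk)).map (·.1) :=
          (PySem.Set.mem_ofList _ j).mp hj
        obtain ⟨u, hu, rfl⟩ := List.mem_map.mp hj'
        have hne : u.1 ≠ tk := by simpa using (List.mem_filter.mp hu).2
        simp [pvKeySum, List.filter_cons, Ne.symm hne]
      rw [hmap]
      simp [add_zero]

theorem pv_merge_sorted (L : List (Int × Int)) (h : L.Pairwise (fun a b => b.1 ≤ a.1)) :
    L.foldl pvMergeStep []
      = (PySem.Set.ofList (L.map (·.1))).map (fun j => (j, pvKeySum L j)) := by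
  cases L with
  | nil => rfl
  | cons t r =>
    obtain ⟨tk, tc⟩ := t
    have hrle : ∀ u ∈ r, u.1 ≤ tk := (List.pairwise_cons.mp h).1
    have hstep : pvMergeStep [] (tk, tc) = [] ++ [((tk, tc) : Int × Int)] := rfl
    rw [List.foldl_cons, hstep,
      pv_merge_go r [] tk tc (List.pairwise_cons.mp h).2 hrle (by simp)]
    have h3 : pvKeySum ((tk, tc) :: r) tk = tc + pvKeySum r tk := by
      simp [pvKeySum, List.filter_cons]
    have h4 : (((tk, tc) :: r).map (·.1)) = tk :: r.map (·.1) := rfl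
    rw [h4, pv_ofList_cons]
    have h5 : (r.map (·.1)).filter (fun x => x != tk)
        = (r.filter (fun u => u.1 != tk)).map (·.1) := by
      rw [List.filter_map]; rfl
    rw [h5]
    simp only [List.map_cons, h3]
    have hmap : (PySem.Set.ofList ((r.filter (fun u => u.1 != tk)).map (·.1))).map
          (fun j => (j, pvKeySum ((tk, tc) :: r) j))
        = (PySem.Set.ofList ((r.filter (fun u => u.1 != tk)).map (·.1))).map
          (fun j => (j, pvKeySum r j)) := by
      apply List.map_congr_left
      intro j hj
      have hj' : j ∈ (r.filter (fun u => u.1 != tk)).map (·.1) :=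
        (PySem.Set.mem_ofList _ j).mp hj
      obtain ⟨u, hu, rfl⟩ := List.mem_map.mp hj'
      have hne : u.1 ≠ tk := by simpa using (List.mem_filter.mp hu).2
      simp [pvKeySum, List.filter_cons, Ne.symm hne]
    rw [hmap]
    simp

theorem pv_main (p1 p2 : List (Int × Int)) : mult_poly p1 p2 = mult_poly_alt p1 p2 := by
  unfold mult_poly mult_poly_alt
  rw [pv_foldA_eq]
  dsimp only
  set T := pvTerms p1 p2 with hT
  set K : List Int := PySem.Set.ofList (T.map (·.1)) with hK
  set exps := PySem.List.sorted K (fun e => -e) with hexps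
  set memo := T.foldl pvStepA PySem.Dict.empty with hmemo
  have hKnd : K.Nodup := PySem.Set.nodup_ofList _
  -- A's memo: keys and values
  have hkeys : memo.keys = K := by
    rw [hmemo, pv_keys_foldA, hK, PySem.Set.ofList_eq_foldl, PySem.Dict.keys_empty]
  have hnd : memo.keys.Nodup := by rw [hkeys]; exact hKnd
  have hval : ∀ e, memo.getD e 0 = pvKeySum T e := by
    intro e; rw [hmemo, pv_getD_foldA, PySem.Dict.getD_empty, zero_add]
  have hitems : memo.items = K.map (fun k => (k, pvKeySum T k)) := by
    rw [PySem.Dict.items_eq_map_keys memo hnd 0, hkeys]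
    exact List.map_congr_left (fun k _ => by rw [hval k])
  -- exps is strictly descending and a permutation of K
  have hexpsnd : exps.Nodup := (PySem.List.sorted_perm K (fun e => -e) false).nodup_iff.mpr hKnd
  have hexpslt : exps.Pairwise (fun a b => -a < -b) :=
    pv_neg_lt_pairwise _ hexpsnd (PySem.List.sorted_pairwise K (fun e => -e))
  -- A's sorted items
  have hsorted : PySem.List.sorted memo.items (fun x => -x.1)
      = exps.map (fun k => (k, pvKeySum T k)) := by
    apply PySem.List.sorted_eq_of_perm_of_pairwise_lt
    · rw [hitems]
      exact (PySem.List.sorted_perm K (fun e => -e) false).map _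
    · rw [List.pairwise_map]
      exact hexpslt
  rw [hsorted, PySem.List.foldl_append_ite (p := fun it : Int × Int => it.2 ≠ 0) (f := fun it : Int × Int => (it.2, it.1)) (l := exps.map (fun k => (k, pvKeySum T k))) (acc := [])]
  -- B's merged list
  set ST := PySem.List.sorted T (fun t => -t.1) with hST
  have hSTpw : ST.Pairwise (fun a b => b.1 ≤ a.1) :=
    (PySem.List.sorted_pairwise T (fun t => -t.1)).imp (fun h => by omega)
  have hSTperm : ST.Perm T := PySem.List.sorted_perm T (fun t => -t.1) false
  have hSsum : ∀ j, pvKeySum ST j = pvKeySum T j := by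
    intro j
    unfold pvKeySum
    exact ((hSTperm.filter _).map _).sum_eq
  have hK'eq : PySem.Set.ofList (ST.map (·.1)) = exps := by
    symm
    apply PySem.List.sorted_eq_of_perm_of_pairwise_lt
    · rw [(List.perm_ext_iff_of_nodup (PySem.Set.nodup_ofList _) hKnd)]
      intro a
      rw [PySem.Set.mem_ofList, hK, PySem.Set.mem_ofList]
      exact (hSTperm.map (·.1)).mem_iff
    · have hsub : List.Sublist (PySem.Set.ofList (ST.map (·.1))) (ST.map (·.1)) := by
        rw [PySem.Set.ofList_eq_foldl]
        simpa using pv_foldl_add_sublist (ST.map (·.1)) []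
      have hpw : (ST.map (·.1)).Pairwise (fun a b => -a ≤ -b) := by
        rw [List.pairwise_map]
        exact (PySem.List.sorted_pairwise T (fun t => -t.1))
      exact pv_neg_lt_pairwise _ (PySem.Set.nodup_ofList _) (hpw.sublist hsub)
  have hmerged : ST.foldl pvMergeStep [] = exps.map (fun j => (j, pvKeySum T j)) := by
    rw [pv_merge_sorted ST hSTpw, hK'eq]
    exact List.map_congr_left (fun j _ => by rw [hSsum j])
  rw [hmerged]
  -- both sides: filter over a map
  simp [List.filter_map]


-- ===== VERDICT (by name: the statement is the Claim_ definition above) =====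
theorem mult_poly_spec : Claim_equal_mult_poly := by
  intro p1 p2 _
  exact pv_main p1 p2
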